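-- pv_equiv track=rewrite | github.com/FranklinVel/proyectofrank | ProyectoFranklin/App.py | llenarMapa
-- ===== SOURCE A (Python) =====
-- def llenarMapa(capacidad):
--     mapa = []
--
--     letras = ["A", "B", "C", "D", "E", "F", "G", "H", "I", "J"]
--
--     count = 1
--     while capacidad > 0:
--         if capacidad < 10:
--             lista = []
--             for idx, _ in enumerate(range(1, capacidad+1)):
--                 lista.append([f"{count}{letras[idx]}"])
--
--         else:
--             lista = []
--             for letra in letras:
--                 lista.append([f"{count}{letra}"])
--
--         mapa.append(lista)
--         capacidad -= 10
--         count += 1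
--
--     return mapa
-- ===== SOURCE B (Python) =====
-- def llenarMapa(capacidad):
--     letras = ["A", "B", "C", "D", "E", "F", "G", "H", "I", "J"]
--     mapa = []
--     for i in range(capacidad):
--         if i % 10 == 0:
--             mapa.append([])
--         mapa[-1].append([f"{i // 10 + 1}{letras[i % 10]}"])
--     return mapa
-- ===== Notes on version B (the rewrite author's own statement) =====
-- stated objective: alternative
-- what changed: Replaces A's nested while-over-rows / for-over-letters structure (mutable countdown, row counter, two duplicated row-building branches) by one flat pass over every seat index i in range(capacidad), computing row as i//10 and column as i%10 and starting a new row whenever i%10==0.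
import Mathlib
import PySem

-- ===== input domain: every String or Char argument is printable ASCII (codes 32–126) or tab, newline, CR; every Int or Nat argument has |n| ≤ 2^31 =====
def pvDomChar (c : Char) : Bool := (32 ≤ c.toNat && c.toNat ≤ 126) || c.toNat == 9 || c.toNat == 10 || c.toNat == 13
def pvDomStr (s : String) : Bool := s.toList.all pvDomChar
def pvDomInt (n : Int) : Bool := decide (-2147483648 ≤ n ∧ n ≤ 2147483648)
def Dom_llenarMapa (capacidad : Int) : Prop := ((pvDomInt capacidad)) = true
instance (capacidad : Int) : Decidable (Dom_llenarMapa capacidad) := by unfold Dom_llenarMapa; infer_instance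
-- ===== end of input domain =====

-- B replaces A's nested while-over-rows / for-over-letters loops (countdown, row counter, two
-- duplicated row-building branches) by ONE flat pass over every seat index i in range(capacidad),
-- with row = i // 10, column = i % 10, opening a new row whenever i % 10 == 0 (objective: alternative).

-- the literal `letras` list both Pythons define
def pvLetras : List String := ["A", "B", "C", "D", "E", "F", "G", "H", "I", "J"]

-- ===== PORT A =====
-- the `while capacidad > 0` loop of A, with its state (capacidad, count); each iteration
-- builds `lista` (branching on capacidad < 10 exactly as A does) and appends it to mapa
def llenarMapaLoop (capacidad : Int) (count : Int) : List (List (List String)) :=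
  if h : 0 < capacidad then
    let lista : List (List String) :=
      if capacidad < 10 then
        (PySem.List.enumerate (PySem.List.pyRange 1 (capacidad + 1) 1)).foldl
          (fun acc p => acc ++ [[PySem.Int.toStr count ++ PySem.List.pyGetD pvLetras p.1 ""]]) []
      else
        pvLetras.foldl (fun acc letra => acc ++ [[PySem.Int.toStr count ++ letra]]) []
    lista :: llenarMapaLoop (capacidad - 10) (count + 1)
  else []
termination_by capacidad.toNat
decreasing_by omega

def llenarMapa (capacidad : Int) : List (List (List String)) :=
  llenarMapaLoop capacidad 1

-- ===== PORT B =====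
-- Source B: one `for i in range(capacidad)` loop over seats; `mapa.append([])` when i % 10 == 0,
-- then `mapa[-1].append([f"{i // 10 + 1}{letras[i % 10]}"])` (pure form of the in-place append:
-- dropLast ++ [last-with-the-new-element]; the getLastD default is never used, mapa is nonempty there)
def llenarMapa_alt (capacidad : Int) : List (List (List String)) :=
  (PySem.List.pyRange 0 capacidad 1).foldl
    (fun mapa i =>
      let mapa1 := if PySem.Int.mod i 10 = 0 then mapa ++ [[]] else mapa
      mapa1.dropLast ++
        [mapa1.getLastD [] ++
          [[PySem.Int.toStr (PySem.Int.floordiv i 10 + 1) ++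
            PySem.List.pyGetD pvLetras (PySem.Int.mod i 10) ""]]])
    []

-- ===== PRECONDITION & SPEC =====
def Spec_llenarMapa (capacidad : Int) (out : List (List (List String))) : Prop := out = llenarMapa_alt capacidad
instance (capacidad : Int) (out : List (List (List String))) : Decidable (Spec_llenarMapa capacidad out) := by unfold Spec_llenarMapa; infer_instance

-- ===== CLAIM (what is proved, stated in full; the proofs are below) =====
def Claim_equal_llenarMapa : Prop := ∀ (capacidad : Int), Dom_llenarMapa capacidad → Spec_llenarMapa capacidad (llenarMapa capacidad)

-- ===== LEMMAS AND PROOFS =====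

-- common bridge: rows indexed by their start offset r ∈ range(0, c, 10), row k generalized by offset k
def pvAltG (c k : Int) : List (List (List String)) :=
  (PySem.List.pyRange 0 c 10).map (fun r =>
    (PySem.List.pyRange 0 (min 10 (c - r)) 1).map (fun cc =>
      [PySem.Int.toStr (PySem.Int.floordiv r 10 + 1 + k) ++ PySem.List.pyGetD pvLetras cc ""]))

-- ---- A-side: the while loop equals the bridge (front recursion) ----

lemma pvRange10_cons {c : Int} (h : 0 < c) :
    PySem.List.pyRange 0 c 10 = 0 :: (PySem.List.pyRange 0 (c - 10) 10).map (· + 10) := by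
  rw [PySem.List.pyRange_of_pos _ _ (by norm_num), PySem.List.pyRange_of_pos _ _ (by norm_num)]
  have hN : (if (0:Int) < c then ((c - 0 + 10 - 1) / 10).toNat else 0)
      = (if (0:Int) < c - 10 then ((c - 10 - 0 + 10 - 1) / 10).toNat else 0) + 1 := by
    split_ifs <;> omega
  rw [hN, List.range_succ_eq_map]
  simp [List.map_map, Function.comp]
  intro a ha
  ring

lemma pvAltG_cons {c : Int} (k : Int) (h : 0 < c) :
    pvAltG c k =
      ((PySem.List.pyRange 0 (min 10 c) 1).map (fun cc =>
        [PySem.Int.toStr (1 + k) ++ PySem.List.pyGetD pvLetras cc ""])) :: pvAltG (c - 10) (k + 1) := by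
  unfold pvAltG
  rw [pvRange10_cons h]
  simp only [List.map_cons, List.map_map]
  congr 1
  · simp
  · apply List.map_congr_left
    intro r _
    have h2 : min 10 (c - (r + 10)) = min 10 (c - 10 - r) := by omega
    simp [Function.comp, h2]
    intro a _ _ _
    congr 1
    omega

lemma pvLoop_eq_altG : ∀ (n : Nat) (c k : Int), c.toNat ≤ n →
    llenarMapaLoop c (k + 1) = pvAltG c k := by
  intro n
  induction n with
  | zero =>
    intro c k hc
    have hc0 : c ≤ 0 := by omega
    rw [llenarMapaLoop, pvAltG, dif_neg (by omega : ¬ (0:Int) < c),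
        PySem.List.pyRange_of_pos _ _ (by norm_num), if_neg (by omega)]
    simp
  | succ m ih =>
    intro c k hc
    by_cases h : 0 < c
    · rw [llenarMapaLoop, dif_pos h, pvAltG_cons k h]
      have htail : llenarMapaLoop (c - 10) (k + 1 + 1) = pvAltG (c - 10) (k + 1) :=
        ih (c - 10) (k + 1) (by omega)
      rw [htail]
      by_cases hlt : c < 10
      · -- small row: enumerate over range(1, c+1)
        rw [if_pos hlt]
        rw [PySem.List.foldl_append_singleton_eq_map]
        have hm : ∀ (xs : List Int),
            (PySem.List.enumerate xs).map
              (fun p => [PySem.Int.toStr (k + 1) ++ PySem.List.pyGetD pvLetras p.1 ""])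
            = ((PySem.List.enumerate xs).map (·.1)).map
              (fun i => [PySem.Int.toStr (k + 1) ++ PySem.List.pyGetD pvLetras i ""]) := by
          intro xs; rw [List.map_map]; rfl
        rw [hm, PySem.List.map_fst_enumerate]
        have hlen : ((PySem.List.pyRange 1 (c + 1) 1).length : Int) = c := by
          rw [PySem.List.length_pyRange_one]; omega
        have hmin : min (10 : Int) c = c := by omega
        rw [hlen, hmin]
        simp [add_comm 1 k]
      · -- full row of 10 letters
        rw [if_neg hlt]
        rw [PySem.List.foldl_append_singleton_eq_map]
        have hmin : min (10 : Int) c = 10 := by omega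
        rw [hmin]
        have hr : PySem.List.pyRange 0 10 1 = [0,1,2,3,4,5,6,7,8,9] := by decide
        rw [hr]
        simp [pvLetras, PySem.List.pyGetD, PySem.List.pyGet?, PySem.List.pyIdx?, add_comm 1 k]
    · rw [llenarMapaLoop, dif_neg h, pvAltG]
      rw [PySem.List.pyRange_of_pos _ _ (by norm_num), if_neg (by omega)]
      simp

-- ---- B-side: the flat seat fold equals the bridge (suffix induction) ----

-- the body of B's for-loop, as a named step function (defeq to the port's lambda)
def pvStep (mapa : List (List (List String))) (i : Int) : List (List (List String)) :=
  (if PySem.Int.mod i 10 = 0 then mapa ++ [[]] else mapa).dropLast ++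
    [(if PySem.Int.mod i 10 = 0 then mapa ++ [[]] else mapa).getLastD [] ++
      [[PySem.Int.toStr (PySem.Int.floordiv i 10 + 1) ++
        PySem.List.pyGetD pvLetras (PySem.Int.mod i 10) ""]]]

lemma alt_unfold (c : Int) :
    llenarMapa_alt c = (PySem.List.pyRange 0 c 1).foldl pvStep [] := rfl

lemma pvRange10_snoc (c : Int) (h0 : 0 ≤ c) :
    PySem.List.pyRange 0 (c + 1) 10 =
      if c % 10 = 0 then PySem.List.pyRange 0 c 10 ++ [c] else PySem.List.pyRange 0 c 10 := by
  rw [PySem.List.pyRange_of_pos 0 (c + 1) (by norm_num), PySem.List.pyRange_of_pos 0 c (by norm_num)]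
  by_cases hm : c % 10 = 0
  · rw [if_pos hm]
    have hq : (if (0:Int) < c + 1 then ((c + 1 - 0 + 10 - 1) / 10).toNat else 0)
        = (if (0:Int) < c then ((c - 0 + 10 - 1) / 10).toNat else 0) + 1 := by
      split_ifs <;> omega
    rw [hq, List.range_succ, List.map_append]
    congr 1
    simp only [List.map_cons, List.map_nil]
    congr 1
    split_ifs <;> omega
  · rw [if_neg hm]
    have hq : (if (0:Int) < c + 1 then ((c + 1 - 0 + 10 - 1) / 10).toNat else 0)
        = (if (0:Int) < c then ((c - 0 + 10 - 1) / 10).toNat else 0) := by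
      split_ifs <;> omega
    rw [hq]

lemma pvRange10_last (c : Int) (h : 0 < c) :
    PySem.List.pyRange 0 c 10 =
      PySem.List.pyRange 0 (10 * ((c - 1) / 10)) 10 ++ [10 * ((c - 1) / 10)] := by
  rw [PySem.List.pyRange_of_pos 0 c (by norm_num),
      PySem.List.pyRange_of_pos 0 (10 * ((c - 1) / 10)) (by norm_num)]
  have hq : (if (0:Int) < c then ((c - 0 + 10 - 1) / 10).toNat else 0)
      = (if (0:Int) < 10 * ((c - 1) / 10) then ((10 * ((c - 1) / 10) - 0 + 10 - 1) / 10).toNat else 0) + 1 := by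
    split_ifs <;> omega
  rw [hq, List.range_succ, List.map_append]
  congr 1
  simp only [List.map_cons, List.map_nil]
  congr 1
  split_ifs <;> omega

lemma pvAltG_snoc (n : Int) (hn : 0 ≤ n) :
    pvAltG (n + 1) 0 =
      if n % 10 = 0
      then pvAltG n 0 ++ [[[PySem.Int.toStr (n / 10 + 1) ++ PySem.List.pyGetD pvLetras (n % 10) ""]]]
      else (pvAltG n 0).dropLast ++
        [(pvAltG n 0).getLastD [] ++
          [[PySem.Int.toStr (n / 10 + 1) ++ PySem.List.pyGetD pvLetras (n % 10) ""]]] := by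
  by_cases hm : n % 10 = 0
  · rw [if_pos hm]
    by_cases h0 : n = 0
    · subst h0; decide
    · unfold pvAltG
      rw [pvRange10_snoc n hn, if_pos hm, List.map_append]
      congr 1
      · apply List.map_congr_left
        intro r hr
        rw [PySem.List.mem_pyRange_iff_of_pos (by norm_num)] at hr
        have h2 : min (10:Int) (n + 1 - r) = min 10 (n - r) := by omega
        rw [h2]
      · simp only [List.map_cons, List.map_nil]
        have h1 : min (10:Int) (n + 1 - n) = 1 := by omega
        rw [h1, show PySem.List.pyRange 0 1 1 = [0] from by decide]
        simp [hm]
  · rw [if_neg hm]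
    have hpos : 0 < n := by omega
    have hlast : (n - 1) / 10 = n / 10 := by omega
    unfold pvAltG
    rw [pvRange10_snoc n hn, if_neg hm, pvRange10_last n hpos, hlast]
    simp only [List.map_append, List.map_cons, List.map_nil, List.dropLast_concat, List.getLastD_concat]
    congr 1
    · apply List.map_congr_left
      intro r hr
      rw [PySem.List.mem_pyRange_iff_of_pos (by norm_num)] at hr
      have h2 : min (10:Int) (n + 1 - r) = min 10 (n - r) := by omega
      rw [h2]
    · congr 1
      have hw' : min (10:Int) (n + 1 - 10 * (n / 10)) = n % 10 + 1 := by omega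
      have hw : min (10:Int) (n - 10 * (n / 10)) = n % 10 := by omega
      rw [hw', hw, PySem.List.pyRange_one_succ_right (by omega : (0:Int) ≤ n % 10),
          List.map_append]
      congr 1
      simp only [List.map_cons, List.map_nil]
      rw [PySem.Int.floordiv_eq_ediv_of_pos (show (0:Int) < 10 by norm_num)]
      have h3 : 10 * (n / 10) / 10 = n / 10 := by omega
      rw [h3]
      simp

lemma step_altG (n : Int) (hn : 0 ≤ n) :
    pvStep (pvAltG n 0) n = pvAltG (n + 1) 0 := by
  rw [pvAltG_snoc n hn]
  unfold pvStep
  simp only [PySem.Int.mod_eq_emod_of_pos (show (0:Int) < 10 by norm_num),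
             PySem.Int.floordiv_eq_ediv_of_pos (show (0:Int) < 10 by norm_num)]
  by_cases hm : n % 10 = 0
  · rw [if_pos hm, if_pos hm, List.dropLast_concat, List.getLastD_concat]
    simp
  · rw [if_neg hm, if_neg hm]

lemma alt_fold (n : Nat) : llenarMapa_alt (n : Int) = pvAltG (n : Int) 0 := by
  induction n with
  | zero =>
    simp only [Nat.cast_zero]
    decide
  | succ k ih =>
    have hc : ((k + 1 : Nat) : Int) = (k : Int) + 1 := by push_cast; ring
    rw [hc, alt_unfold, PySem.List.pyRange_one_succ_right (Int.natCast_nonneg k),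
        List.foldl_append, ← alt_unfold, ih]
    simp only [List.foldl_cons, List.foldl_nil]
    exact step_altG _ (Int.natCast_nonneg k)

lemma alt_eq_altG (c : Int) : llenarMapa_alt c = pvAltG c 0 := by
  by_cases hc : 0 ≤ c
  · have h := alt_fold c.toNat
    rwa [Int.toNat_of_nonneg hc] at h
  · rw [alt_unfold, PySem.List.pyRange_one_eq_nil (by omega : c ≤ 0)]
    unfold pvAltG
    rw [PySem.List.pyRange_of_pos 0 c (by norm_num), if_neg (by omega)]
    simp

-- ===== VERDICT (by name: the statement is the Claim_ definition above) =====
theorem llenarMapa_spec : Claim_equal_llenarMapa := by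
  intro c _
  unfold Spec_llenarMapa llenarMapa
  have hA := pvLoop_eq_altG c.toNat c 0 (le_refl _)
  rw [alt_eq_altG c]
  simpa using hA
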